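-- pv_equiv track=rewrite | github.com/iSparshP/helix_ir | src/helix_ir/schema/serialization.py | _split_struct_fields
-- ===== SOURCE A (Python) =====
-- def _split_struct_fields(s: str) -> list[str]:
--     """Split struct field definitions respecting nested angle brackets."""
--     fields: list[str] = []
--     depth = 0
--     current: list[str] = []
--     for ch in s:
--         if ch == "<":
--             depth += 1
--             current.append(ch)
--         elif ch == ">":
--             depth -= 1
--             current.append(ch)
--         elif ch == "," and depth == 0:
--             fields.append("".join(current).strip())
--             current = []
--         else:
--             current.append(ch)
--     if current:
--         fields.append("".join(current).strip())
--     return fields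
-- ===== SOURCE B (Python) =====
-- def _top_comma_index(s: str):
--     """Index of the first comma at angle-bracket depth 0, or None."""
--     depth = 0
--     for i, ch in enumerate(s):
--         if ch == "<":
--             depth += 1
--         elif ch == ">":
--             depth -= 1
--         elif ch == "," and depth == 0:
--             return i
--     return None
--
--
-- def _split_struct_fields(s: str) -> list[str]:
--     """Split struct field definitions respecting nested angle brackets."""
--     i = _top_comma_index(s)
--     if i is None:
--         return [s.strip()] if s else []
--     return [s[:i].strip()] + _split_struct_fields(s[i + 1:])
-- ===== Notes on version B (the rewrite author's own statement) =====
-- stated objective: alternative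
-- what changed: Replaced the single accumulator loop (fields/depth/current state) by a recursive decomposition: a helper finds the first top-level comma index and the function slices there, strips the head, and recurses on the remainder.
import Mathlib
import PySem

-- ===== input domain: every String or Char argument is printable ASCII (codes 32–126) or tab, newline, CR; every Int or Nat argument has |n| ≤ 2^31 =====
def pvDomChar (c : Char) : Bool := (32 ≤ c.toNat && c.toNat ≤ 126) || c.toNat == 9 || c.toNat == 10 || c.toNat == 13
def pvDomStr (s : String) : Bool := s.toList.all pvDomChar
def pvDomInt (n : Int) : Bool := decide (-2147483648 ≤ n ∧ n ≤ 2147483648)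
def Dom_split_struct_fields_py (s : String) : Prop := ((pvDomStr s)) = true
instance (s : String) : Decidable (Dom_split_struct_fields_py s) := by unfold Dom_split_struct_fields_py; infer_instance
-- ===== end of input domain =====

-- B replaces A's one-pass accumulator loop by a recursive decomposition: find the first top-level comma, slice there, recurse (alternative structure, same cost).

-- ===== PORT A =====
-- A's for-loop with its state (fields, depth, current); the trailing 'if current: append' lands in the [] case
def pvLoopA : List Char → List String → Int → List Char → List String
  | [], fields, _, current =>
      if current ≠ [] then fields ++ [String.ofList (PySem.Chars.strip current)] else fields
  | c :: cs, fields, depth, current =>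
      if c = '<' then pvLoopA cs fields (depth + 1) (current ++ [c])
      else if c = '>' then pvLoopA cs fields (depth - 1) (current ++ [c])
      else if c = ',' ∧ depth = 0 then
        pvLoopA cs (fields ++ [String.ofList (PySem.Chars.strip current)]) depth []
      else pvLoopA cs fields depth (current ++ [c])

def split_struct_fields_py (s : String) : List String :=
  pvLoopA s.toList [] 0 []

-- ===== PORT B =====
-- _top_comma_index: walk the string with a running depth; index of the first depth-0 comma
def pvTopComma : List Char → Int → Option Nat
  | [], _ => none
  | c :: cs, depth =>
      if c = '<' then (pvTopComma cs (depth + 1)).map (· + 1)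
      else if c = '>' then (pvTopComma cs (depth - 1)).map (· + 1)
      else if c = ',' ∧ depth = 0 then some 0
      else (pvTopComma cs depth).map (· + 1)

-- the slices s[:i] / s[i+1:] with 0 ≤ i (pvTopComma returns a Nat index into cs) are exactly take i / drop (i+1)
def pvSplitB (cs : List Char) : List String :=
  match h : pvTopComma cs 0 with
  | none => if cs ≠ [] then [String.ofList (PySem.Chars.strip cs)] else []
  | some i => String.ofList (PySem.Chars.strip (cs.take i)) :: pvSplitB (cs.drop (i + 1))
  termination_by cs.length
  decreasing_by
    cases cs with
    | nil => simp [pvTopComma] at h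
    | cons c cs' => simp [List.length_drop]

def split_struct_fields_py_alt (s : String) : List String :=
  pvSplitB s.toList

-- ===== PRECONDITION & SPEC =====
def Spec_split_struct_fields_py (s : String) (out : List String) : Prop := out = split_struct_fields_py_alt s
instance (s : String) (out : List String) : Decidable (Spec_split_struct_fields_py s out) := by unfold Spec_split_struct_fields_py; infer_instance

-- ===== CLAIM (what is proved, stated in full; the proofs are below) =====
def Claim_equal_split_struct_fields_py : Prop := ∀ (s : String), Dom_split_struct_fields_py s → Spec_split_struct_fields_py s (split_struct_fields_py s)

-- ===== LEMMAS AND PROOFS =====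

-- Invariant of A's loop, phrased against B's structure: the fields emitted so far, then
-- the field formed from `current` plus the input up to the next top-level comma, then
-- B's recursive split of the remainder after that comma.
theorem pvLoopA_eq (cs : List Char) : ∀ (depth : Int) (current : List Char) (fields : List String),
    pvLoopA cs fields depth current =
      fields ++ (match pvTopComma cs depth with
        | none => if current ++ cs ≠ [] then [String.ofList (PySem.Chars.strip (current ++ cs))] else []
        | some i => String.ofList (PySem.Chars.strip (current ++ cs.take i)) :: pvSplitB (cs.drop (i + 1))) := by
  induction cs with
  | nil =>
    intro depth current fields
    simp [pvLoopA, pvTopComma]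
    split_ifs <;> simp
  | cons c cs ih =>
    intro depth current fields
    by_cases h1 : c = '<'
    · subst h1
      rw [pvLoopA, pvTopComma]
      rw [ih]
      cases htc : pvTopComma cs (depth + 1) with
      | none => simp
      | some i => simp
    · by_cases h2 : c = '>'
      · subst h2
        rw [pvLoopA, pvTopComma]
        simp only [if_neg h1]
        rw [ih]
        cases htc : pvTopComma cs (depth - 1) with
        | none => simp
        | some i => simp
      · by_cases h3 : c = ',' ∧ depth = 0
        · obtain ⟨hc, hd⟩ := h3
          subst hc; subst hd
          rw [pvLoopA, pvTopComma]
          simp only [if_neg h1, if_neg h2, and_self, if_true,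
            List.drop_succ_cons, List.take_zero, List.drop_zero,
            List.append_nil]
          rw [ih, pvSplitB.eq_def]
          cases htc : pvTopComma cs 0 <;> simp [htc]
        · rw [pvLoopA, pvTopComma]
          simp only [if_neg h1, if_neg h2, if_neg h3]
          rw [ih]
          cases htc : pvTopComma cs depth with
          | none => simp
          | some i => simp

-- ===== VERDICT (by name: the statement is the Claim_ definition above) =====
theorem split_struct_fields_py_spec : Claim_equal_split_struct_fields_py := by
  intro s _
  unfold Spec_split_struct_fields_py split_struct_fields_py split_struct_fields_py_alt
  rw [pvLoopA_eq, pvSplitB.eq_def]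
  cases htc : pvTopComma s.toList 0 <;> simp [htc]
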